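-- pv_equiv track=rewrite | github.com/HarshaVippala/ResumeForge | backend/services/section_generator.py | _generate_skills_fallback
-- ===== SOURCE A (Python) =====
-- from typing import Dict, List, Any, Optional
--
-- def _generate_skills_fallback(
--
--     keywords: List[str],
--     base_content: str,
--     job_context: Dict[str, Any],
--     preferences: Optional[Dict[str, Any]]
-- ) -> str:
--     """Fallback skills generation"""
--
--     # Categorize keywords
--     categories = {
--         "Languages": [],
--         "Frameworks": [],
--         "Cloud & DevOps": [],
--         "Databases": [],
--         "Tools": []
--     }
--
--     for keyword in keywords:
--         kw_lower = keyword.lower()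
--         if any(lang in kw_lower for lang in ['python', 'javascript', 'java', 'typescript', 'go']):
--             categories["Languages"].append(keyword)
--         elif any(fw in kw_lower for fw in ['react', 'angular', 'vue', 'node', 'django', 'flask']):
--             categories["Frameworks"].append(keyword)
--         elif any(cloud in kw_lower for cloud in ['aws', 'azure', 'docker', 'kubernetes', 'ci/cd']):
--             categories["Cloud & DevOps"].append(keyword)
--         elif any(db in kw_lower for db in ['mysql', 'postgresql', 'mongodb', 'redis', 'sql']):
--             categories["Databases"].append(keyword)
--         else:
--             categories["Tools"].append(keyword)
--
--     # Build skills string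
--     skills_parts = []
--     for category, skills in categories.items():
--         if skills:
--             skills_parts.append(f"{category}: {', '.join(skills)}")
--
--     if skills_parts:
--         return " | ".join(skills_parts)
--     else:
--         return ", ".join(keywords)
-- ===== SOURCE B (Python) =====
-- def _generate_skills_fallback(keywords, base_content, job_context, preferences):
--     """Fallback skills generation (recursive sieve: peel off each category's
--     matches from the remaining keywords, category by category)."""
--     rules = [
--         ("Languages", ['python', 'javascript', 'java', 'typescript', 'go']),
--         ("Frameworks", ['react', 'angular', 'vue', 'node', 'django', 'flask']),
--         ("Cloud & DevOps", ['aws', 'azure', 'docker', 'kubernetes', 'ci/cd']),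
--         ("Databases", ['mysql', 'postgresql', 'mongodb', 'redis', 'sql']),
--     ]
--
--     def sieve(rules, remaining):
--         # recursion on the rules list: everything still unmatched after the
--         # last rule is "Tools"; order inside a group is the original order
--         if not rules:
--             return [("Tools", remaining)]
--         (name, markers) = rules[0]
--         hit = [kw for kw in remaining if any(m in kw.lower() for m in markers)]
--         miss = [kw for kw in remaining if not any(m in kw.lower() for m in markers)]
--         return [(name, hit)] + sieve(rules[1:], miss)
--
--     groups = sieve(rules, keywords)
--     parts = ["%s: %s" % (name, ", ".join(skills)) for name, skills in groups if skills]
--     return " | ".join(parts) if parts else ", ".join(keywords)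
-- ===== Notes on version B (the rewrite author's own statement) =====
-- stated objective: alternative
-- what changed: Replaces the per-keyword if/elif routing into a mutable five-bucket dict by a recursive sieve over the category rules: each category filters its matches out of the still-unmatched keywords and recurses on the rest, with the final remainder becoming Tools.
import Mathlib
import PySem

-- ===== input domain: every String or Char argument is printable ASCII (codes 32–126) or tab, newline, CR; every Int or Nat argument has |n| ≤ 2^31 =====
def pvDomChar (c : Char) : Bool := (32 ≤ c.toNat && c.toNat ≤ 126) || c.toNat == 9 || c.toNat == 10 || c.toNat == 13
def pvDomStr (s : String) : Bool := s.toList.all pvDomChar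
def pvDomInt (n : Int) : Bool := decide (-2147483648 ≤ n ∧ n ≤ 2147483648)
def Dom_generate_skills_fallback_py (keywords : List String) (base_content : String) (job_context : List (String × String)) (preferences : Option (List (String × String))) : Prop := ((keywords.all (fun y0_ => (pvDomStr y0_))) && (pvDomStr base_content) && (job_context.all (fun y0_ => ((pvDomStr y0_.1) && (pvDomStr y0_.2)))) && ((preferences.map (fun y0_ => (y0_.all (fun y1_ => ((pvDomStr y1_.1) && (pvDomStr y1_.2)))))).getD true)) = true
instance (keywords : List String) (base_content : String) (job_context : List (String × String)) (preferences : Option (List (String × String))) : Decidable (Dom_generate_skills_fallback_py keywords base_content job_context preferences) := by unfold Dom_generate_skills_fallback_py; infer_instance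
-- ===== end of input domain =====

-- B replaces A's per-keyword if/elif dict-bucket loop with a recursive sieve over the
-- category rules (peel off each category's matches, recurse on the remainder); alternative decomposition, same cost.

-- ===== PORT A =====
def generate_skills_fallback_py (keywords : List String) (base_content : String) (job_context : List (String × String)) (preferences : Option (List (String × String))) : String :=
  let categories : PySem.Dict String (List String) :=
    PySem.Dict.ofList [("Languages", []), ("Frameworks", []), ("Cloud & DevOps", []), ("Databases", []), ("Tools", [])]
  let categories := keywords.foldl (fun cats keyword =>
    let kw_lower := PySem.Str.lower keyword
    if ["python", "javascript", "java", "typescript", "go"].any (fun lang => PySem.Str.isIn lang kw_lower) then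
      cats.modify "Languages" [] (fun xs => xs ++ [keyword])
    else if ["react", "angular", "vue", "node", "django", "flask"].any (fun fw => PySem.Str.isIn fw kw_lower) then
      cats.modify "Frameworks" [] (fun xs => xs ++ [keyword])
    else if ["aws", "azure", "docker", "kubernetes", "ci/cd"].any (fun cloud => PySem.Str.isIn cloud kw_lower) then
      cats.modify "Cloud & DevOps" [] (fun xs => xs ++ [keyword])
    else if ["mysql", "postgresql", "mongodb", "redis", "sql"].any (fun db => PySem.Str.isIn db kw_lower) then
      cats.modify "Databases" [] (fun xs => xs ++ [keyword])
    else
      cats.modify "Tools" [] (fun xs => xs ++ [keyword])) categories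
  let skills_parts := categories.items.foldl (fun parts p =>
    if p.2 ≠ [] then parts ++ [p.1 ++ ": " ++ PySem.Str.join ", " p.2] else parts) []
  if skills_parts ≠ [] then PySem.Str.join " | " skills_parts else PySem.Str.join ", " keywords

-- ===== PORT B =====
def pvRulesB : List (String × List String) :=
  [("Languages", ["python", "javascript", "java", "typescript", "go"]),
   ("Frameworks", ["react", "angular", "vue", "node", "django", "flask"]),
   ("Cloud & DevOps", ["aws", "azure", "docker", "kubernetes", "ci/cd"]),
   ("Databases", ["mysql", "postgresql", "mongodb", "redis", "sql"])]

-- recursive sieve on the rules list (Source B's `sieve`)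
def pvSieveB : List (String × List String) → List String → List (String × List String)
  | [], remaining => [("Tools", remaining)]
  | (name, markers) :: rest, remaining =>
    let hit := remaining.filter (fun kw => markers.any (fun m => PySem.Str.isIn m (PySem.Str.lower kw)))
    let miss := remaining.filter (fun kw => ! markers.any (fun m => PySem.Str.isIn m (PySem.Str.lower kw)))
    (name, hit) :: pvSieveB rest miss

def generate_skills_fallback_py_alt (keywords : List String) (base_content : String) (job_context : List (String × String)) (preferences : Option (List (String × String))) : String :=
  let groups := pvSieveB pvRulesB keywords
  let parts := (groups.filter (fun g => g.2 ≠ [])).map (fun g => g.1 ++ ": " ++ PySem.Str.join ", " g.2)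
  if parts ≠ [] then PySem.Str.join " | " parts else PySem.Str.join ", " keywords

-- ===== PRECONDITION & SPEC =====
def Spec_generate_skills_fallback_py (keywords : List String) (base_content : String) (job_context : List (String × String)) (preferences : Option (List (String × String))) (out : String) : Prop := out = generate_skills_fallback_py_alt keywords base_content job_context preferences
instance (keywords : List String) (base_content : String) (job_context : List (String × String)) (preferences : Option (List (String × String))) (out : String) : Decidable (Spec_generate_skills_fallback_py keywords base_content job_context preferences out) := by unfold Spec_generate_skills_fallback_py; infer_instance

-- ===== CLAIM (what is proved, stated in full; the proofs are below) =====
def Claim_equal_generate_skills_fallback_py : Prop := ∀ (keywords : List String) (base_content : String) (job_context : List (String × String)) (preferences : Option (List (String × String))), Dom_generate_skills_fallback_py keywords base_content job_context preferences → Spec_generate_skills_fallback_py keywords base_content job_context preferences (generate_skills_fallback_py keywords base_content job_context preferences)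

-- ===== LEMMAS AND PROOFS =====

-- the four classification tests
def pvT1 (kw : String) : Bool := ["python", "javascript", "java", "typescript", "go"].any (fun lang => PySem.Str.isIn lang (PySem.Str.lower kw))
def pvT2 (kw : String) : Bool := ["react", "angular", "vue", "node", "django", "flask"].any (fun fw => PySem.Str.isIn fw (PySem.Str.lower kw))
def pvT3 (kw : String) : Bool := ["aws", "azure", "docker", "kubernetes", "ci/cd"].any (fun cloud => PySem.Str.isIn cloud (PySem.Str.lower kw))
def pvT4 (kw : String) : Bool := ["mysql", "postgresql", "mongodb", "redis", "sql"].any (fun db => PySem.Str.isIn db (PySem.Str.lower kw))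
def pvF1 (kw : String) : Bool := pvT1 kw
def pvF2 (kw : String) : Bool := !pvT1 kw && pvT2 kw
def pvF3 (kw : String) : Bool := !pvT1 kw && !pvT2 kw && pvT3 kw
def pvF4 (kw : String) : Bool := !pvT1 kw && !pvT2 kw && !pvT3 kw && pvT4 kw
def pvF5 (kw : String) : Bool := !pvT1 kw && !pvT2 kw && !pvT3 kw && !pvT4 kw

def pvK0 : List String := ["Languages", "Frameworks", "Cloud & DevOps", "Databases", "Tools"]

-- A's loop body, named so the foldl lemmas can speak about it
def pvStepA (cats : PySem.Dict String (List String)) (keyword : String) : PySem.Dict String (List String) :=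
    let kw_lower := PySem.Str.lower keyword
    if ["python", "javascript", "java", "typescript", "go"].any (fun lang => PySem.Str.isIn lang kw_lower) then
      cats.modify "Languages" [] (fun xs => xs ++ [keyword])
    else if ["react", "angular", "vue", "node", "django", "flask"].any (fun fw => PySem.Str.isIn fw kw_lower) then
      cats.modify "Frameworks" [] (fun xs => xs ++ [keyword])
    else if ["aws", "azure", "docker", "kubernetes", "ci/cd"].any (fun cloud => PySem.Str.isIn cloud kw_lower) then
      cats.modify "Cloud & DevOps" [] (fun xs => xs ++ [keyword])
    else if ["mysql", "postgresql", "mongodb", "redis", "sql"].any (fun db => PySem.Str.isIn db kw_lower) then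
      cats.modify "Databases" [] (fun xs => xs ++ [keyword])
    else
      cats.modify "Tools" [] (fun xs => xs ++ [keyword])

theorem pvStepA_eq : (fun (cats : PySem.Dict String (List String)) (keyword : String) =>
    let kw_lower := PySem.Str.lower keyword
    if ["python", "javascript", "java", "typescript", "go"].any (fun lang => PySem.Str.isIn lang kw_lower) then
      cats.modify "Languages" [] (fun xs => xs ++ [keyword])
    else if ["react", "angular", "vue", "node", "django", "flask"].any (fun fw => PySem.Str.isIn fw kw_lower) then
      cats.modify "Frameworks" [] (fun xs => xs ++ [keyword])
    else if ["aws", "azure", "docker", "kubernetes", "ci/cd"].any (fun cloud => PySem.Str.isIn cloud kw_lower) then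
      cats.modify "Cloud & DevOps" [] (fun xs => xs ++ [keyword])
    else if ["mysql", "postgresql", "mongodb", "redis", "sql"].any (fun db => PySem.Str.isIn db kw_lower) then
      cats.modify "Databases" [] (fun xs => xs ++ [keyword])
    else
      cats.modify "Tools" [] (fun xs => xs ++ [keyword])) = pvStepA := rfl

theorem pvStepA_getD (cats : PySem.Dict String (List String)) (kw : String) (k0 : String)
    (hk : k0 ∈ pvK0) (g : String → Bool)
    (hg : ∀ x, g x = (if pvT1 x then k0 == "Languages" else if pvT2 x then k0 == "Frameworks"
          else if pvT3 x then k0 == "Cloud & DevOps" else if pvT4 x then k0 == "Databases" else k0 == "Tools")) :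
    (pvStepA cats kw).getD k0 [] = cats.getD k0 [] ++ (if g kw then [kw] else []) := by
  unfold pvStepA
  rw [hg kw]
  fin_cases hk <;> simp only [pvT1, pvT2, pvT3, pvT4] <;> split_ifs <;>
    simp_all [PySem.Dict.getD_modify]

theorem pvFoldA_getD (ks : List String) (cats : PySem.Dict String (List String)) (k0 : String)
    (hk : k0 ∈ pvK0) (g : String → Bool)
    (hg : ∀ x, g x = (if pvT1 x then k0 == "Languages" else if pvT2 x then k0 == "Frameworks"
          else if pvT3 x then k0 == "Cloud & DevOps" else if pvT4 x then k0 == "Databases" else k0 == "Tools")) :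
    (ks.foldl pvStepA cats).getD k0 [] = cats.getD k0 [] ++ ks.filter g := by
  induction ks generalizing cats with
  | nil => simp
  | cons k ks ih =>
    rw [List.foldl_cons, ih, pvStepA_getD cats k k0 hk g hg, List.filter_cons, List.append_assoc]
    cases hgk : g k <;> simp

theorem pvModify_keys (cats : PySem.Dict String (List String)) (h : cats.keys = pvK0)
    (k : String) (f : List String → List String) (hk : k ∈ pvK0) :
    (cats.modify k [] f).keys = pvK0 := by
  have hc : cats.contains k = true := by
    rw [PySem.Dict.contains_eq_decide_mem_keys, h]; simpa using hk
  simp [PySem.Dict.keys_modify, PySem.Dict.keys_insert_of_contains, hc, h]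

theorem pvStepA_keys (cats : PySem.Dict String (List String)) (kw : String) (h : cats.keys = pvK0) :
    (pvStepA cats kw).keys = pvK0 := by
  unfold pvStepA
  simp only [pvT1]
  split_ifs <;> exact pvModify_keys _ h _ _ (by decide)

theorem pvFoldA_keys (ks : List String) (cats : PySem.Dict String (List String)) (h : cats.keys = pvK0) :
    (ks.foldl pvStepA cats).keys = pvK0 := by
  induction ks generalizing cats with
  | nil => exact h
  | cons k ks ih => exact ih _ (pvStepA_keys _ _ h)

theorem pvG1 : ∀ x, pvF1 x = (if pvT1 x then ("Languages" : String) == "Languages" else if pvT2 x then "Languages" == "Frameworks"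
    else if pvT3 x then "Languages" == "Cloud & DevOps" else if pvT4 x then "Languages" == "Databases" else "Languages" == "Tools") := by
  intro x; cases h1 : pvT1 x <;> cases h2 : pvT2 x <;> cases h3 : pvT3 x <;> cases h4 : pvT4 x <;> simp_all [pvF1]
theorem pvG2 : ∀ x, pvF2 x = (if pvT1 x then ("Frameworks" : String) == "Languages" else if pvT2 x then "Frameworks" == "Frameworks"
    else if pvT3 x then "Frameworks" == "Cloud & DevOps" else if pvT4 x then "Frameworks" == "Databases" else "Frameworks" == "Tools") := by
  intro x; cases h1 : pvT1 x <;> cases h2 : pvT2 x <;> cases h3 : pvT3 x <;> cases h4 : pvT4 x <;> simp_all [pvF2]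
theorem pvG3 : ∀ x, pvF3 x = (if pvT1 x then ("Cloud & DevOps" : String) == "Languages" else if pvT2 x then "Cloud & DevOps" == "Frameworks"
    else if pvT3 x then "Cloud & DevOps" == "Cloud & DevOps" else if pvT4 x then "Cloud & DevOps" == "Databases" else "Cloud & DevOps" == "Tools") := by
  intro x; cases h1 : pvT1 x <;> cases h2 : pvT2 x <;> cases h3 : pvT3 x <;> cases h4 : pvT4 x <;> simp_all [pvF3]
theorem pvG4 : ∀ x, pvF4 x = (if pvT1 x then ("Databases" : String) == "Languages" else if pvT2 x then "Databases" == "Frameworks"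
    else if pvT3 x then "Databases" == "Cloud & DevOps" else if pvT4 x then "Databases" == "Databases" else "Databases" == "Tools") := by
  intro x; cases h1 : pvT1 x <;> cases h2 : pvT2 x <;> cases h3 : pvT3 x <;> cases h4 : pvT4 x <;> simp_all [pvF4]
theorem pvG5 : ∀ x, pvF5 x = (if pvT1 x then ("Tools" : String) == "Languages" else if pvT2 x then "Tools" == "Frameworks"
    else if pvT3 x then "Tools" == "Cloud & DevOps" else if pvT4 x then "Tools" == "Databases" else "Tools" == "Tools") := by
  intro x; cases h1 : pvT1 x <;> cases h2 : pvT2 x <;> cases h3 : pvT3 x <;> cases h4 : pvT4 x <;> simp_all [pvF5]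

-- the sieve over the concrete rules list yields exactly the five first-match filters
theorem pvSieveB_spec (keywords : List String) :
    pvSieveB pvRulesB keywords =
      [("Languages", keywords.filter pvF1), ("Frameworks", keywords.filter pvF2),
       ("Cloud & DevOps", keywords.filter pvF3), ("Databases", keywords.filter pvF4),
       ("Tools", keywords.filter pvF5)] := by
  simp only [pvRulesB, pvSieveB, List.filter_filter]
  refine congrArg₂ _ (congrArg _ ?_) (congrArg₂ _ (congrArg _ ?_)
    (congrArg₂ _ (congrArg _ ?_) (congrArg₂ _ (congrArg _ ?_) (congrArg₂ _ (congrArg _ ?_) rfl)))) <;>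
    apply List.filter_congr <;> intro x _ <;>
    simp only [pvF1, pvF2, pvF3, pvF4, pvF5, pvT1, pvT2, pvT3, pvT4] <;>
    cases h1 : ["python", "javascript", "java", "typescript", "go"].any (fun lang => PySem.Str.isIn lang (PySem.Str.lower x)) <;>
    cases h2 : ["react", "angular", "vue", "node", "django", "flask"].any (fun fw => PySem.Str.isIn fw (PySem.Str.lower x)) <;>
    cases h3 : ["aws", "azure", "docker", "kubernetes", "ci/cd"].any (fun cloud => PySem.Str.isIn cloud (PySem.Str.lower x)) <;>
    cases h4 : ["mysql", "postgresql", "mongodb", "redis", "sql"].any (fun db => PySem.Str.isIn db (PySem.Str.lower x)) <;>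
    simp [h1, h2, h3, h4]

-- ===== VERDICT (by name: the statement is the Claim_ definition above) =====
theorem generate_skills_fallback_py_spec : Claim_equal_generate_skills_fallback_py := by
  intro keywords base_content job_context preferences _
  unfold Spec_generate_skills_fallback_py
  unfold generate_skills_fallback_py generate_skills_fallback_py_alt
  rw [pvStepA_eq, pvSieveB_spec]
  set d0 : PySem.Dict String (List String) :=
    PySem.Dict.ofList [("Languages", []), ("Frameworks", []), ("Cloud & DevOps", []), ("Databases", []), ("Tools", [])] with hd0
  have hk0 : d0.keys = pvK0 := by rw [hd0]; rfl
  have hkeys : (keywords.foldl pvStepA d0).keys = pvK0 := pvFoldA_keys _ _ hk0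
  have hnd : (keywords.foldl pvStepA d0).keys.Nodup := by rw [hkeys]; decide
  have e1 : (keywords.foldl pvStepA d0).getD "Languages" [] = keywords.filter pvF1 := by
    rw [pvFoldA_getD keywords d0 "Languages" (by decide) pvF1 pvG1, hd0]; rfl
  have e2 : (keywords.foldl pvStepA d0).getD "Frameworks" [] = keywords.filter pvF2 := by
    rw [pvFoldA_getD keywords d0 "Frameworks" (by decide) pvF2 pvG2, hd0]; rfl
  have e3 : (keywords.foldl pvStepA d0).getD "Cloud & DevOps" [] = keywords.filter pvF3 := by
    rw [pvFoldA_getD keywords d0 "Cloud & DevOps" (by decide) pvF3 pvG3, hd0]; rfl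
  have e4 : (keywords.foldl pvStepA d0).getD "Databases" [] = keywords.filter pvF4 := by
    rw [pvFoldA_getD keywords d0 "Databases" (by decide) pvF4 pvG4, hd0]; rfl
  have e5 : (keywords.foldl pvStepA d0).getD "Tools" [] = keywords.filter pvF5 := by
    rw [pvFoldA_getD keywords d0 "Tools" (by decide) pvF5 pvG5, hd0]; rfl
  simp only [PySem.Dict.items_eq_map_keys _ hnd [], hkeys, pvK0,
    List.map_cons, List.map_nil, List.foldl_cons, List.foldl_nil,
    List.filter_cons, List.filter_nil, e1, e2, e3, e4, e5]
  by_cases h1 : keywords.filter pvF1 = [] <;> by_cases h2 : keywords.filter pvF2 = [] <;>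
    by_cases h3 : keywords.filter pvF3 = [] <;> by_cases h4 : keywords.filter pvF4 = [] <;>
    by_cases h5 : keywords.filter pvF5 = [] <;> simp [h1, h2, h3, h4, h5]
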